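-- pv_equiv track=rewrite | github.com/Ayaan-P/per-scholas-capstone | backend/organization_matching_service.py | get_geographic_match_score
-- ===== SOURCE A (Python) =====
-- from typing import Dict, List, Optional, Tuple
--
-- def get_geographic_match_score(org_profile: Dict, grant_geographic_focus: Optional[str]) -> float:
--     """
--     Score geographic alignment between organization service regions and grant focus.
--
--     Args:
--         org_profile: Organization profile
--         grant_geographic_focus: Geographic focus from grant (city, state, region, or "National")
--
--     Returns:
--         Score 0-100
--     """
--     if not grant_geographic_focus:
--         return 50  # Neutral score if no geographic info
--
--     service_regions = org_profile.get("service_regions", [])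
--     if not service_regions:
--         return 50  # Org hasn't specified service regions
--
--     grant_focus = grant_geographic_focus.lower()
--
--     # National grants are excellent for any org
--     if "national" in grant_focus or "nationwide" in grant_focus or "united states" in grant_focus:
--         return 100
--
--     # Check for direct regional matches
--     for region in service_regions:
--         if isinstance(region, str):
--             if region.lower() in grant_focus or grant_focus in region.lower():
--                 return 90
--
--     # Check for state-level match
--     for region in service_regions:
--         if isinstance(region, str) and len(region.split()) > 0:
--             # Extract state from "City, State" format
--             if "," in region:
--                 state = region.split(",")[-1].strip()
--                 if state.lower() in grant_focus:
--                     return 75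
--
--     # Check for broader geographic relevance
--     if "rural" in grant_focus and any("rural" in str(r).lower() for r in service_regions):
--         return 70
--     if "urban" in grant_focus and any("urban" in str(r).lower() or len(str(r).split()) > 1 for r in service_regions):
--         return 70
--
--     # No geographic match found
--     return 25
-- ===== SOURCE B (Python) =====
-- def get_geographic_match_score(org_profile, grant_geographic_focus):
--     """Single pass over service_regions accumulating the best tier score.
--
--     Equivalent to the three ordered scans because the tier scores are
--     strictly descending, so 'first matching tier' = 'maximum applicable tier'.
--     """
--     if not grant_geographic_focus:
--         return 50
--     regions = org_profile.get("service_regions", [])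
--     if not regions:
--         return 50
--     gf = grant_geographic_focus.lower()
--     if any(k in gf for k in ("national", "nationwide", "united states")):
--         return 100
--     best = 25
--     for region in regions:
--         s = str(region)
--         sl = s.lower()
--         if isinstance(region, str) and (sl in gf or gf in sl):
--             best = max(best, 90)
--         elif isinstance(region, str) and "," in s and s.split(",")[-1].strip().lower() in gf:
--             best = max(best, 75)
--         elif ("rural" in gf and "rural" in sl) or \
--              ("urban" in gf and ("urban" in sl or len(s.split()) > 1)):
--             best = max(best, 70)
--     return best
-- ===== Notes on version B (the rewrite author's own statement) =====
-- stated objective: simpler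
-- what changed: Replaces A's three sequential scans over service_regions (direct match, then state match, then rural/urban) with one loop that computes a per-region tier score and keeps the running maximum, correct because the tier scores are strictly descending.
import Mathlib
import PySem

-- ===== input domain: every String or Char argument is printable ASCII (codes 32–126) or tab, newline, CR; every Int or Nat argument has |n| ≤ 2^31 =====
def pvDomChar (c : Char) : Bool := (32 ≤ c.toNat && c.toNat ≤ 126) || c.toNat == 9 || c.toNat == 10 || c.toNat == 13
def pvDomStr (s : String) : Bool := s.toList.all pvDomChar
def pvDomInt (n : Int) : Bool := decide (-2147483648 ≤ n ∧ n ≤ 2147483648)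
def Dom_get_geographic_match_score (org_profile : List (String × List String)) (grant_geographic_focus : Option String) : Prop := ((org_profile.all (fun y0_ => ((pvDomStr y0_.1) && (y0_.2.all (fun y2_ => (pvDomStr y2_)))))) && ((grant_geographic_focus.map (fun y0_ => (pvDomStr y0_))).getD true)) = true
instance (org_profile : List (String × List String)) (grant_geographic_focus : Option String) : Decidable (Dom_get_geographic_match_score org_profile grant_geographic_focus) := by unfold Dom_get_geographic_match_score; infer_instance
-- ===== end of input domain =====

-- B replaces A's three sequential scans over the regions with one loop keeping the
-- running maximum tier score (objective: simpler; the tiers are strictly descending).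

-- ===== PORT A =====
-- A's 'for … return k' passes are ported as 'if any … then k'; region.split(",")[-1]:
-- split? with a nonempty separator is always `some` and the split list is nonempty,
-- so the [-1] index never raises and the `.getD` defaults are dead.
def get_geographic_match_score (org_profile : List (String × List String)) (grant_geographic_focus : Option String) : Int :=
  match grant_geographic_focus with
  | none => 50
  | some g =>
    if g = "" then 50
    else
      let service_regions := (PySem.Dict.mk org_profile).getD "service_regions" []
      if service_regions = [] then 50
      else
        let grant_focus := PySem.Str.lower g
        if PySem.Str.isIn "national" grant_focus || PySem.Str.isIn "nationwide" grant_focus || PySem.Str.isIn "united states" grant_focus then 100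
        else if service_regions.any (fun region =>
            PySem.Str.isIn (PySem.Str.lower region) grant_focus || PySem.Str.isIn grant_focus (PySem.Str.lower region)) then 90
        else if service_regions.any (fun region =>
            decide ((PySem.Str.split₀ region).length > 0) &&
            (PySem.Str.isIn "," region &&
             PySem.Str.isIn (PySem.Str.lower (PySem.Str.strip ((PySem.List.pyGet? ((PySem.Str.split? region ",").getD []) (-1)).getD ""))) grant_focus)) then 75
        else if PySem.Str.isIn "rural" grant_focus && service_regions.any (fun r => PySem.Str.isIn "rural" (PySem.Str.lower r)) then 70
        else if PySem.Str.isIn "urban" grant_focus && service_regions.any (fun r => PySem.Str.isIn "urban" (PySem.Str.lower r) || decide ((PySem.Str.split₀ r).length > 1)) then 70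
        else 25

-- ===== PORT B =====
-- per-region tier score (the body of Source B's single loop); isinstance(region, str) is
-- always true under the Lean type and is dropped.
def pvTier (gf r : String) : Int :=
  let sl := PySem.Str.lower r
  if PySem.Str.isIn sl gf || PySem.Str.isIn gf sl then 90
  else if PySem.Str.isIn "," r &&
          PySem.Str.isIn (PySem.Str.lower (PySem.Str.strip ((PySem.List.pyGet? ((PySem.Str.split? r ",").getD []) (-1)).getD ""))) gf then 75
  else if (PySem.Str.isIn "rural" gf && PySem.Str.isIn "rural" sl) ||
          (PySem.Str.isIn "urban" gf && (PySem.Str.isIn "urban" sl || decide ((PySem.Str.split₀ r).length > 1))) then 70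
  else 25

def get_geographic_match_score_alt (org_profile : List (String × List String)) (grant_geographic_focus : Option String) : Int :=
  match grant_geographic_focus with
  | none => 50
  | some g =>
    if g = "" then 50
    else
      let regions := (PySem.Dict.mk org_profile).getD "service_regions" []
      if regions = [] then 50
      else
        let gf := PySem.Str.lower g
        if ["national", "nationwide", "united states"].any (fun k => PySem.Str.isIn k gf) then 100
        else regions.foldl (fun best r => max best (pvTier gf r)) 25

-- ===== PRECONDITION & SPEC =====
def Spec_get_geographic_match_score (org_profile : List (String × List String)) (grant_geographic_focus : Option String) (out : Int) : Prop := out = get_geographic_match_score_alt org_profile grant_geographic_focus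
instance (org_profile : List (String × List String)) (grant_geographic_focus : Option String) (out : Int) : Decidable (Spec_get_geographic_match_score org_profile grant_geographic_focus out) := by unfold Spec_get_geographic_match_score; infer_instance

-- ===== CLAIM (what is proved, stated in full; the proofs are below) =====
def Claim_equal_get_geographic_match_score : Prop := ∀ (org_profile : List (String × List String)) (grant_geographic_focus : Option String), Dom_get_geographic_match_score org_profile grant_geographic_focus → Spec_get_geographic_match_score org_profile grant_geographic_focus (get_geographic_match_score org_profile grant_geographic_focus)

-- ===== LEMMAS AND PROOFS =====

-- the per-region predicates of A's three passes
def pvQ90 (gf r : String) : Bool :=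
  PySem.Str.isIn (PySem.Str.lower r) gf || PySem.Str.isIn gf (PySem.Str.lower r)
def pvB75 (gf r : String) : Bool :=
  PySem.Str.isIn "," r &&
  PySem.Str.isIn (PySem.Str.lower (PySem.Str.strip ((PySem.List.pyGet? ((PySem.Str.split? r ",").getD []) (-1)).getD ""))) gf
def pvQ75 (gf r : String) : Bool := decide ((PySem.Str.split₀ r).length > 0) && pvB75 gf r
def pvR (r : String) : Bool := PySem.Str.isIn "rural" (PySem.Str.lower r)
def pvU (r : String) : Bool := PySem.Str.isIn "urban" (PySem.Str.lower r) || decide ((PySem.Str.split₀ r).length > 1)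

-- A's tail (after the shared guards) as a function of the lowered focus and regions
def pvCas (gf : String) (l : List String) : Int :=
  if l.any (pvQ90 gf) then 90
  else if l.any (pvQ75 gf) then 75
  else if PySem.Str.isIn "rural" gf && l.any pvR then 70
  else if PySem.Str.isIn "urban" gf && l.any pvU then 70
  else 25

-- a string containing a non-whitespace character has at least one whitespace-split word
lemma pv_split₀_go_ne_nil (s cur : List Char) (acc : List (List Char))
    (h : acc ≠ [] ∨ cur ≠ [] ∨ ∃ c ∈ s, PySem.Chars.isspace c = false) :
    PySem.Chars.split₀.go s cur acc ≠ [] := by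
  induction s generalizing cur acc with
  | nil =>
    unfold PySem.Chars.split₀.go
    rcases h with h | h | h
    · split_ifs with hc <;> simp_all
    · split_ifs with hc <;> simp_all
    · simp at h
  | cons c rest ih =>
    unfold PySem.Chars.split₀.go
    by_cases hs : PySem.Chars.isspace c = true
    · simp only [hs, if_true]
      have hrest : acc ≠ [] ∨ cur ≠ [] ∨ ∃ d ∈ rest, PySem.Chars.isspace d = false := by
        rcases h with h | h | h
        · exact Or.inl h
        · exact Or.inr (Or.inl h)
        · rcases h with ⟨d, hd, hdf⟩
          rcases List.mem_cons.mp hd with rfl | hd'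
          · simp [hs] at hdf
          · exact Or.inr (Or.inr ⟨d, hd', hdf⟩)
      by_cases hc : cur.isEmpty
      · simp only [hc, if_true]
        apply ih
        rcases hrest with h | h | h
        · exact Or.inl h
        · rw [List.isEmpty_iff] at hc; exact absurd hc h
        · exact Or.inr (Or.inr h)
      · simp only [hc]
        apply ih
        exact Or.inl (by simp)
    · simp only [hs]
      apply ih
      exact Or.inr (Or.inl (by simp))

lemma pv_comma_split₀ (r : String) (h : PySem.Str.isIn "," r = true) :
    (PySem.Str.split₀ r).length > 0 := by
  have hmem : ',' ∈ r.toList := by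
    have hinf := (PySem.Chars.isIn_iff_infix (",".toList) r.toList).mp (by simpa using h)
    rcases hinf with ⟨s, t, hst⟩
    rw [← hst]; simp
  simp only [PySem.Str.split₀, List.length_map, PySem.Chars.split₀]
  exact List.length_pos_iff.mpr
    (pv_split₀_go_ne_nil r.toList [] [] (Or.inr (Or.inr ⟨',', hmem, by decide⟩)))

lemma pv_q75_eq_b75 (gf r : String) : pvQ75 gf r = pvB75 gf r := by
  unfold pvQ75
  by_cases hc : PySem.Str.isIn "," r = true
  · simp only [pv_comma_split₀ r hc, decide_true, Bool.true_and]
  · have hc' : PySem.Str.isIn "," r = false := Bool.eq_false_iff.mpr hc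
    unfold pvB75
    rw [hc']
    simp

lemma pv_tier_eq (gf r : String) :
    pvTier gf r =
      if pvQ90 gf r then 90
      else if pvQ75 gf r then 75
      else if (PySem.Str.isIn "rural" gf && pvR r) || (PySem.Str.isIn "urban" gf && pvU r) then 70
      else 25 := by
  rw [pv_q75_eq_b75]
  unfold pvTier pvQ90 pvB75 pvR pvU
  rfl

-- the purely boolean shape of 'max (tier of one region) (cascade of the rest) = cascade of all'
lemma pv_max_step (q90r q75r gr gu rr ur a90 a75 ar au : Bool) :
    max (if q90r then (90 : Int) else if q75r then 75 else if (gr && rr) || (gu && ur) then 70 else 25)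
        (if a90 then 90 else if a75 then 75 else if gr && ar then 70 else if gu && au then 70 else 25)
      = if q90r || a90 then 90
        else if q75r || a75 then 75
        else if gr && (rr || ar) then 70
        else if gu && (ur || au) then 70
        else 25 := by
  revert q90r q75r gr gu rr ur a90 a75 ar au
  decide

lemma pv_foldl_eq_cas (gf : String) (l : List String) :
    ∀ b : Int, 25 ≤ b → l.foldl (fun best r => max best (pvTier gf r)) b = max b (pvCas gf l) := by
  induction l with
  | nil => intro b hb; simp only [List.foldl_nil, pvCas, List.any_nil, Bool.false_eq_true, if_false, Bool.and_false]; exact (max_eq_left hb).symm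
  | cons r l ih =>
    intro b hb
    have h25 : 25 ≤ pvTier gf r := by rw [pv_tier_eq]; split_ifs <;> omega
    simp only [List.foldl_cons]
    rw [ih _ (le_trans hb (le_max_left _ _)), max_assoc]
    congr 1
    rw [pv_tier_eq]
    show max _ (pvCas gf l) = pvCas gf (r :: l)
    unfold pvCas
    simp only [List.any_cons]
    exact pv_max_step (pvQ90 gf r) (pvQ75 gf r) (PySem.Str.isIn "rural" gf)
      (PySem.Str.isIn "urban" gf) (pvR r) (pvU r) (l.any (pvQ90 gf)) (l.any (pvQ75 gf))
      (l.any pvR) (l.any pvU)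

-- ===== VERDICT (by name: the statement is the Claim_ definition above) =====
theorem get_geographic_match_score_spec : Claim_equal_get_geographic_match_score := by
  intro org_profile gf _
  unfold Spec_get_geographic_match_score
  unfold get_geographic_match_score get_geographic_match_score_alt
  cases gf with
  | none => rfl
  | some g =>
    by_cases hg : g = ""
    · simp only [hg, if_true]
    · simp only [hg, if_false]
      set regions := (PySem.Dict.mk org_profile).getD "service_regions" [] with hreg
      by_cases hr : regions = []
      · simp only [hr, if_true]
      · simp only [hr, if_false]
        set gl := PySem.Str.lower g with hgl
        have hnat : (["national", "nationwide", "united states"].any (fun k => PySem.Str.isIn k gl)) =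
            (PySem.Str.isIn "national" gl || PySem.Str.isIn "nationwide" gl || PySem.Str.isIn "united states" gl) := by
          simp only [List.any_cons, List.any_nil, Bool.or_false]
          rw [Bool.or_assoc]
        rw [hnat]
        by_cases hn : (PySem.Str.isIn "national" gl || PySem.Str.isIn "nationwide" gl || PySem.Str.isIn "united states" gl) = true
        · rw [if_pos hn, if_pos hn]
        · rw [if_neg hn, if_neg hn]
          have hA : (if regions.any (fun region =>
                PySem.Str.isIn (PySem.Str.lower region) gl || PySem.Str.isIn gl (PySem.Str.lower region)) then (90 : Int)
              else if regions.any (fun region =>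
                decide ((PySem.Str.split₀ region).length > 0) &&
                (PySem.Str.isIn "," region &&
                 PySem.Str.isIn (PySem.Str.lower (PySem.Str.strip ((PySem.List.pyGet? ((PySem.Str.split? region ",").getD []) (-1)).getD ""))) gl)) then 75
              else if PySem.Str.isIn "rural" gl && regions.any (fun r => PySem.Str.isIn "rural" (PySem.Str.lower r)) then 70
              else if PySem.Str.isIn "urban" gl && regions.any (fun r => PySem.Str.isIn "urban" (PySem.Str.lower r) || decide ((PySem.Str.split₀ r).length > 1)) then 70
              else 25) = pvCas gl regions := by
            unfold pvCas pvQ90 pvQ75 pvB75 pvR pvU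
            rfl
          rw [hA, pv_foldl_eq_cas gl regions 25 (le_refl 25)]
          have hb : 25 ≤ pvCas gl regions := by unfold pvCas; split_ifs <;> omega
          exact (max_eq_right hb).symm
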